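-- pv_equiv track=rewrite | github.com/errorinmysyntax/Threatsense-Sniffer-Windows | sniffer.py | _domain_matches
-- ===== SOURCE A (Python) =====
-- def _domain_matches(domain, patterns):
--     domain = domain.lower().strip(".")
--     for entry in patterns or []:
--         candidate = entry.lower().strip(".")
--         if domain == candidate:
--             return True
--         if domain.endswith("." + candidate):
--             return True
--     return False
-- ===== SOURCE B (Python) =====
-- def _domain_matches(domain, patterns):
--     norms = {p.lower().strip(".") for p in (patterns or [])}
--     d = domain.lower().strip(".")
--     if d in norms:
--         return True
--     return any(d[i + 1:] in norms for i, ch in enumerate(d) if ch == ".")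
-- ===== Notes on version B (the rewrite author's own statement) =====
-- stated objective: alternative
-- what changed: B builds a set of normalized patterns once and iterates over the domain's dot-aligned suffixes testing set membership, instead of scanning every pattern and calling endswith per pattern.
import Mathlib
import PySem

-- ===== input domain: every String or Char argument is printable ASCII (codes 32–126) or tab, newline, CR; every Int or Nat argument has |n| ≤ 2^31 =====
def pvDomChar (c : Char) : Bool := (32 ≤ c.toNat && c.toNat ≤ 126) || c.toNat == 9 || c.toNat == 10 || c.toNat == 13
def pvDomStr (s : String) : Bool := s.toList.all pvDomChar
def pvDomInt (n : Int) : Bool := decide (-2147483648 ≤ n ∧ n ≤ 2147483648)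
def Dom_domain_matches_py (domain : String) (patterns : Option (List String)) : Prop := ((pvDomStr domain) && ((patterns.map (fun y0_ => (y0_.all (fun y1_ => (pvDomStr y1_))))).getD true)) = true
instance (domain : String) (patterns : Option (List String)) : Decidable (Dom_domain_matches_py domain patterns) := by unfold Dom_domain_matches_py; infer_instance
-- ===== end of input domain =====

-- B replaces A's per-pattern endswith scan by a one-pass set of normalized patterns
-- queried with the domain's dot-aligned suffixes (return value only; no side effects).

-- shared normalization: s.lower().strip(".")
def pvNorm (s : String) : String := PySem.Str.stripChars (PySem.Str.lower s) "."

-- ===== PORT A =====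
-- loop with early `return True` over `patterns or []` → List.any
def domain_matches_py (domain : String) (patterns : Option (List String)) : Bool :=
  let d := pvNorm domain
  (patterns.getD []).any (fun entry =>
    let candidate := pvNorm entry
    d == candidate || PySem.Str.endswith d ("." ++ candidate))

-- ===== PORT B =====
-- set of normalized patterns; `d in norms` then any over enumerate(d) filtered on '.',
-- d[i+1:] with 0 ≤ i < len(d) is exactly drop (i+1) (nonnegative in-range slice).
def domain_matches_py_alt (domain : String) (patterns : Option (List String)) : Bool :=
  let norms : PySem.Set String := PySem.Set.ofList ((patterns.getD []).map pvNorm)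
  let d := pvNorm domain
  if PySem.Set.contains norms d then true
  else
    (PySem.List.enumerate d.toList).any (fun p =>
      p.2 == '.' && PySem.Set.contains norms (String.ofList (d.toList.drop (p.1.toNat + 1))))

-- ===== PRECONDITION & SPEC =====
def Spec_domain_matches_py (domain : String) (patterns : Option (List String)) (out : Bool) : Prop := out = domain_matches_py_alt domain patterns
instance (domain : String) (patterns : Option (List String)) (out : Bool) : Decidable (Spec_domain_matches_py domain patterns out) := by unfold Spec_domain_matches_py; infer_instance

-- ===== CLAIM (what is proved, stated in full; the proofs are below) =====
def Claim_equal_domain_matches_py : Prop := ∀ (domain : String) (patterns : Option (List String)), Dom_domain_matches_py domain patterns → Spec_domain_matches_py domain patterns (domain_matches_py domain patterns)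

-- ===== LEMMAS AND PROOFS =====

-- '.'-preceded suffixes of a char list, characterized by the dot position
theorem dot_suffix_iff (cs ds : List Char) :
    ('.' :: cs <:+ ds) ↔ ∃ k, ∃ h : k < ds.length, ds[k] = '.' ∧ cs = ds.drop (k + 1) := by
  constructor
  · rintro ⟨t, rfl⟩
    refine ⟨t.length, by simp, ?_, ?_⟩
    · simp
    · simp [List.drop_append]
  · rintro ⟨k, hk, hdot, rfl⟩
    have : ds.drop k = '.' :: ds.drop (k + 1) := by
      rw [List.drop_eq_getElem_cons hk, hdot]
    exact this ▸ List.drop_suffix k ds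

theorem main_iff (d : String) (ps : List String) :
    ((ps.any fun entry =>
        d == pvNorm entry || PySem.Str.endswith d ("." ++ pvNorm entry)) = true)
      ↔ ((PySem.Set.contains (PySem.Set.ofList (ps.map pvNorm)) d = true) ∨
          ((PySem.List.enumerate d.toList).any (fun p =>
            p.2 == '.' && PySem.Set.contains (PySem.Set.ofList (ps.map pvNorm))
              (String.ofList (d.toList.drop (p.1.toNat + 1)))) = true)) := by
  simp only [List.any_eq_true, Bool.or_eq_true, Bool.and_eq_true, beq_iff_eq,
    PySem.Set.contains_iff, PySem.Set.mem_ofList, List.mem_map,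
    PySem.Str.endswith_eq, PySem.Chars.endswith_iff, PySem.List.mem_enumerate_iff]
  constructor
  · rintro ⟨e, he, h | h⟩
    · exact Or.inl ⟨e, he, h.symm⟩
    · rw [show ("." ++ pvNorm e).toList = '.' :: (pvNorm e).toList by simp,
        dot_suffix_iff] at h
      obtain ⟨k, hk, hdot, hcs⟩ := h
      refine Or.inr ⟨(k, d.toList[k]), ⟨k, hk, by simp⟩, hdot, e, he, ?_⟩
      simp only [Int.toNat_natCast]
      rw [← hcs]
      simp
  · rintro (⟨e, he, h⟩ | ⟨p, ⟨k, hk, hp⟩, hdot, e, he, h⟩)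
    · exact ⟨e, he, Or.inl h.symm⟩
    · refine ⟨e, he, Or.inr ?_⟩
      rw [show ("." ++ pvNorm e).toList = '.' :: (pvNorm e).toList by simp,
        dot_suffix_iff]
      subst hp
      have hpair : ((0 + (k : Int), d.toList[k]).1.toNat + 1) = k + 1 := by simp
      rw [hpair] at h
      refine ⟨k, hk, by simpa using hdot, ?_⟩
      rw [h, String.toList_ofList]

-- ===== VERDICT (by name: the statement is the Claim_ definition above) =====
theorem domain_matches_py_spec : Claim_equal_domain_matches_py := by
  intro domain patterns _
  unfold Spec_domain_matches_py domain_matches_py domain_matches_py_alt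
  by_cases h : PySem.Set.contains (PySem.Set.ofList ((patterns.getD []).map pvNorm)) (pvNorm domain) = true
  · rw [if_pos h]
    exact (main_iff (pvNorm domain) (patterns.getD [])).mpr (Or.inl h)
  · rw [if_neg h]
    rcases hB : (PySem.List.enumerate (pvNorm domain).toList).any (fun p =>
        p.2 == '.' && PySem.Set.contains (PySem.Set.ofList ((patterns.getD []).map pvNorm))
          (String.ofList ((pvNorm domain).toList.drop (p.1.toNat + 1)))) with hb | hb
    · rcases hA : ((patterns.getD []).any fun entry =>
          pvNorm domain == pvNorm entry || PySem.Str.endswith (pvNorm domain) ("." ++ pvNorm entry)) with ha | ha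
      · rfl
      · rcases (main_iff (pvNorm domain) (patterns.getD [])).mp hA with hc | hc
        · exact absurd hc h
        · rw [hB] at hc; exact absurd hc (by simp)
    · exact (main_iff (pvNorm domain) (patterns.getD [])).mpr (Or.inr hB)
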